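-- pv_equiv track=rewrite | github.com/yixinye1423/ColumnGeneration | research_supportFull.py | isValidState2
-- ===== SOURCE A (Python) =====
-- def isValidState2(state):
--     if len(state) < 2:#at least 2 units
--         return False
--     if state.count('active') > 2:#at most 2 active units
--         return False
--     if state.count('being repaired') > len(state)-1:#at most 2 active units
--         return False
--     if (('standby' in state) and (state.count('active')<=1)):#if there's standby, at least 2 units are good
--         return False
--     if (('standby' in state) and (state.count('active')>=2)):
--         standbyPos = state.index('standby')
--         actPos = [index for index, value in enumerate(state) if value == 'active']
--         for ele in actPos:
--             if standbyPos < ele: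
--                 return False
--     #if (state.count('being repaired') >= len(state)):#scenario reduction
--     #    return False
--     #if (state.count('being repaired') >= 2 and state.index('active') != 0):
--     #    return False
--
--     return True
-- ===== SOURCE B (Python) =====
-- def isValidState2(state):
--     active = 0
--     repaired = 0
--     first_standby = None
--     max_active = None
--     for i, v in enumerate(state):
--         if v == 'active':
--             active += 1
--             max_active = i
--         elif v == 'being repaired':
--             repaired += 1
--         elif v == 'standby' and first_standby is None:
--             first_standby = i
--     if len(state) < 2 or active > 2 or repaired > len(state) - 1:
--         return False
--     if first_standby is not None:
--         if active <= 1: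
--             return False
--         if max_active is not None and first_standby < max_active:
--             return False
--     return True
-- ===== Notes on version B (the rewrite author's own statement) =====
-- stated objective: simpler
-- what changed: Replaces A's five separate scans (two count('active'), count('being repaired'), 'in', index, and a position comprehension with an inner loop) by a single pass that accumulates the active/repaired counts, the first standby index and the last active index, then evaluates the rules once.
import Mathlib
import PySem

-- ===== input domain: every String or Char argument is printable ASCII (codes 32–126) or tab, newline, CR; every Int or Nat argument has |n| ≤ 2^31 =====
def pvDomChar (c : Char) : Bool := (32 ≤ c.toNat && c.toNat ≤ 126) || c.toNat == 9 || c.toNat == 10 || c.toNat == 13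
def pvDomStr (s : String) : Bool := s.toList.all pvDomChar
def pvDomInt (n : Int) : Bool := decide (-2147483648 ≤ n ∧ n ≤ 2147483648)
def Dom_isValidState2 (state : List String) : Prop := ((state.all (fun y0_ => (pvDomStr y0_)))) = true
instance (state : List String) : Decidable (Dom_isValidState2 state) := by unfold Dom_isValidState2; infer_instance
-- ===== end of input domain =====

-- B replaces A's five separate scans by one pass accumulating the counts, the first
-- standby index and the last active index (objective: simpler).

-- ===== PORT A =====
def isValidState2 (state : List String) : Bool :=
  if state.length < 2 then false
  else if 2 < state.count "active" then false
  else if (state.length : Int) - 1 < (state.count "being repaired" : Int) then false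
  else if state.contains "standby" && decide (state.count "active" ≤ 1) then false
  else if state.contains "standby" && decide (2 ≤ state.count "active") then
    match PySem.List.index? state "standby" with
    | some standbyPos =>
        let actPos := ((PySem.List.enumerate state).filter (fun p => p.2 == "active")).map (·.1)
        -- for ele in actPos: if standbyPos < ele: return False; then return True
        if actPos.any (fun ele => decide ((standbyPos : Int) < ele)) then false else true
    | none => true  -- unreachable: "standby" ∈ state here
  else true

-- ===== PORT B =====
def pvStep (acc : Int × Int × Option Int × Option Int) (p : Int × String) :
    Int × Int × Option Int × Option Int :=
  if p.2 == "active" then (acc.1 + 1, acc.2.1, acc.2.2.1, some p.1)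
  else if p.2 == "being repaired" then (acc.1, acc.2.1 + 1, acc.2.2.1, acc.2.2.2)
  else if p.2 == "standby" && acc.2.2.1.isNone then (acc.1, acc.2.1, some p.1, acc.2.2.2)
  else acc

def isValidState2_alt (state : List String) : Bool :=
  let r := (PySem.List.enumerate state).foldl pvStep (0, 0, none, none)
  if state.length < 2 || decide (2 < r.1) || decide ((state.length : Int) - 1 < r.2.1) then false
  else
    match r.2.2.1 with
    | none => true
    | some f =>
      if r.1 ≤ 1 then false
      else
        match r.2.2.2 with
        | some m => if f < m then false else true
        | none => true

-- ===== PRECONDITION & SPEC =====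
def Spec_isValidState2 (state : List String) (out : Bool) : Prop := out = isValidState2_alt state
instance (state : List String) (out : Bool) : Decidable (Spec_isValidState2 state out) := by unfold Spec_isValidState2; infer_instance

-- ===== CLAIM (what is proved, stated in full; the proofs are below) =====
def Claim_equal_isValidState2 : Prop := ∀ (state : List String), Dom_isValidState2 state → Spec_isValidState2 state (isValidState2 state)

-- ===== LEMMAS AND PROOFS =====

/-- first index (from `s`) holding "standby" -/
def pvFirstStandby : List String → Int → Option Int
  | [], _ => none
  | x :: t, s => if x = "standby" then some s else pvFirstStandby t (s + 1)

/-- last index (from `s`) holding "active", with default `ma` -/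
def pvLastActive : List String → Int → Option Int → Option Int
  | [], _, ma => ma
  | x :: t, s, ma => pvLastActive t (s + 1) (if x = "active" then some s else ma)

theorem pvFold_spec (xs : List String) (s a r : Int) (fs ma : Option Int) :
    (PySem.List.enumerate xs s).foldl pvStep (a, r, fs, ma)
      = (a + xs.count "active", r + xs.count "being repaired",
         (match fs with | some f => some f | none => pvFirstStandby xs s),
         pvLastActive xs s ma) := by
  induction xs generalizing s a r fs ma with
  | nil => simp [PySem.List.enumerate_nil, pvFirstStandby, pvLastActive]; cases fs <;> rfl
  | cons x t ih =>
    rw [PySem.List.enumerate_cons, List.foldl_cons]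
    by_cases hx : x = "active"
    · simp [pvStep, hx, pvFirstStandby, pvLastActive, ih]
      omega
    · by_cases hr : x = "being repaired"
      · simp [pvStep, hr, pvFirstStandby, pvLastActive, ih]
        omega
      · by_cases hs : x = "standby"
        · cases fs with
          | none => simp [pvStep, hs, pvFirstStandby, pvLastActive, ih]
          | some f => simp [pvStep, hs, pvLastActive, ih]
        · simp [pvStep, hx, hr, hs, pvFirstStandby, pvLastActive, ih]

theorem pvFirstStandby_eq (xs : List String) (s : Int) :
    pvFirstStandby xs s
      = Option.map (fun k : Nat => s + (k : Int)) (PySem.List.index? xs "standby") := by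
  induction xs generalizing s with
  | nil => simp [pvFirstStandby, PySem.List.index?]
  | cons x t ih =>
    by_cases hx : x = "standby"
    · subst hx; rw [PySem.List.index?_cons_self]; simp [pvFirstStandby]
    · rw [PySem.List.index?_cons_of_ne t hx]
      simp only [pvFirstStandby, if_neg hx, ih, Option.map_map]
      cases PySem.List.index? t "standby" <;> simp <;> ring

theorem pvLastActive_orElse (xs : List String) (s : Int) (ma : Option Int) :
    pvLastActive xs s ma
      = (match pvLastActive xs s none with | some m => some m | none => ma) := by
  induction xs generalizing s ma with
  | nil => simp [pvLastActive]
  | cons x t ih =>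
    by_cases hx : x = "active"
    · simp only [pvLastActive, if_pos hx]
      rw [ih (s + 1) (some s)]
      rcases h : pvLastActive t (s + 1) none with _ | m
      · simp
      · simp
    · simp only [pvLastActive, if_neg hx]
      exact ih (s + 1) ma

theorem pvLastActive_ge (xs : List String) (s m : Int)
    (h : pvLastActive xs s none = some m) : s ≤ m := by
  induction xs generalizing s with
  | nil => simp [pvLastActive] at h
  | cons x t ih =>
    by_cases hx : x = "active"
    · simp only [pvLastActive, if_pos hx] at h
      rw [pvLastActive_orElse] at h
      rcases hm : pvLastActive t (s + 1) none with _ | m'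
      · rw [hm] at h; simp at h; omega
      · rw [hm] at h; simp at h; subst h; have := ih (s + 1) hm; omega
    · simp only [pvLastActive, if_neg hx] at h
      have := ih (s + 1) h; omega

theorem pvAny_eq_lastActive (xs : List String) (s p : Int) :
    (((PySem.List.enumerate xs s).filter (fun q => q.2 == "active")).map (·.1)).any
        (fun ele => decide (p < ele))
      = (match pvLastActive xs s none with | some m => decide (p < m) | none => false) := by
  induction xs generalizing s with
  | nil => simp [PySem.List.enumerate_nil, pvLastActive]
  | cons x t ih =>
    rw [PySem.List.enumerate_cons]
    by_cases hx : x = "active"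
    · simp only [List.filter_cons, pvLastActive, if_pos hx,
        show (((s : Int), x).2 == "active") = true by simpa using hx]
      rw [pvLastActive_orElse]
      rcases hm : pvLastActive t (s + 1) none with _ | m
      · simp [ih, hm]
      · have hsm := pvLastActive_ge t (s + 1) m hm
        simp [ih, hm]
        omega
    · simp only [List.filter_cons, pvLastActive, if_neg hx,
        show (((s : Int), x).2 == "active") = false by simpa using hx]
      simp [ih]

theorem isValidState2_eq (state : List String) :
    isValidState2 state = isValidState2_alt state := by
  unfold isValidState2 isValidState2_alt
  rw [pvFold_spec]
  simp only [zero_add]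
  rw [pvFirstStandby_eq]
  rcases hk : PySem.List.index? state "standby" with _ | k
  · -- no standby in the list
    have hmem : "standby" ∉ state := (PySem.List.index?_eq_none_iff state "standby").mp hk
    have hc : state.contains "standby" = false := by simpa using hmem
    simp only [hk, hc, Bool.false_and, Option.map_none]
    by_cases h1 : state.length < 2
    · simp [h1]
    · by_cases h2 : 2 < state.count "active"
      · simp [h1, h2, show (2:Int) < (state.count "active" : Int) by exact_mod_cast h2]
      · have h2i : ¬ ((2:Int) < (state.count "active" : Int)) := by exact_mod_cast h2
        by_cases h3 : (state.length : Int) - 1 < (state.count "being repaired" : Int)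
        · simp [h1, h2, h2i, h3]
        · simp [h1, h2, h2i, h3]
  · -- standby present at first index k
    have hmem : "standby" ∈ state := by
      have := PySem.List.index?_isSome_iff state "standby"
      rw [hk] at this; simpa using this
    have hc : state.contains "standby" = true := by simpa using hmem
    simp only [hk, hc, Option.map_some, Bool.true_and]
    by_cases h1 : state.length < 2
    · simp [h1]
    · by_cases h2 : 2 < state.count "active"
      · simp [h1, h2, show (2:Int) < (state.count "active" : Int) by exact_mod_cast h2]
      · have h2i : ¬ ((2:Int) < (state.count "active" : Int)) := by exact_mod_cast h2
        by_cases h3 : (state.length : Int) - 1 < (state.count "being repaired" : Int)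
        · simp [h1, h2, h2i, h3]
        · by_cases h4 : state.count "active" ≤ 1
          · have h4i : (state.count "active" : Int) ≤ 1 := by exact_mod_cast h4
            simp [h1, h2, h2i, h3, h4, h4i]
          · have h4i : ¬ ((state.count "active" : Int) ≤ 1) := by exact_mod_cast h4
            have h5 : 2 ≤ state.count "active" := by omega
            simp only [h1, h2i, h3, h4, h5, decide_true, decide_false,
              if_false, if_true]
            rw [pvAny_eq_lastActive]
            rcases hm : pvLastActive state 0 none with _ | m
            · simp [h1, h2, h2i, h3, h4i]
            · by_cases hpm : (k : Int) < m
              · simp [h1, h2, h2i, h3, h4i, hpm, show (0 : Int) + k < m by omega]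
              · simp [h1, h2, h2i, h3, h4i, hpm, show ¬ ((0 : Int) + k < m) by omega]

-- ===== VERDICT (by name: the statement is the Claim_ definition above) =====
theorem isValidState2_spec : Claim_equal_isValidState2 := by
  intro state _
  unfold Spec_isValidState2
  exact isValidState2_eq state
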